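-- pv_equiv track=rewrite | github.com/Lucateck98/card_reader | testCardReaderLinux.py | bcc
-- ===== SOURCE A (Python) =====
-- def bcc(byteBCC):
--
--     result = 0x00
--
--     for i in range(len(byteBCC)):
--
--         result ^= byteBCC[i]
--
--
--         if byteBCC[i] == 0x00:
--
--             if byteBCC[i+1] == 0x03:
--
--                 result ^= byteBCC[i+1]
--                 break
--
--     return result
-- ===== SOURCE B (Python) =====
-- def bcc(byteBCC):
--     # pass 1: locate the 0x00,0x03 terminator pair (if any) -> endpoint
--     end = len(byteBCC)
--     for j, (x, y) in enumerate(zip(byteBCC, byteBCC[1:])):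
--         if x == 0x00 and y == 0x03:
--             end = j + 2
--             break
--     # pass 2: XOR everything up to (and including) the terminator
--     result = 0x00
--     for v in byteBCC[:end]:
--         result ^= v
--     return result
-- ===== Notes on version B (the rewrite author's own statement) =====
-- stated objective: alternative
-- what changed: B separates the work into two passes - a scan over adjacent pairs that locates the 0x00,0x03 terminator and fixes an endpoint, then a plain XOR fold over the prefix - instead of A's single fused loop that XORs while peeking at byteBCC[i+1] (and thereby raises IndexError on a trailing lone 0x00, which B does not).
import Mathlib
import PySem

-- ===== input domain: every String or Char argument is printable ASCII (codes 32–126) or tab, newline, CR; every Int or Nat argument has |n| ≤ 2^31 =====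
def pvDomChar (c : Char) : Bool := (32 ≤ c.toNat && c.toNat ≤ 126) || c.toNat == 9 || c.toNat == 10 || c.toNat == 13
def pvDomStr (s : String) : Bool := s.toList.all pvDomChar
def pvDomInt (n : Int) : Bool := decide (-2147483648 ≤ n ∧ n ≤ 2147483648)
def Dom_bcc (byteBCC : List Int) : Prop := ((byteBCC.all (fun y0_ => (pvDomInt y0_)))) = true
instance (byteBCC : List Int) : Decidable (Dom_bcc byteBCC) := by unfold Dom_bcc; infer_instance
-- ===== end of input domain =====

-- B separates locating the 0x00,0x03 terminator (a scan over adjacent pairs) from the XOR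
-- accumulation (a fold over the prefix), instead of A's single fused loop with in-loop lookahead.

-- ===== PORT A =====
-- 'for i in range(len(byteBCC))' with the in-loop lookahead byteBCC[i+1] and break
def bccLoop (byteBCC : List Int) (i : Nat) (result : Int) : Int :=
  if h : i < byteBCC.length then
    if byteBCC[i] = 0 then
      match PySem.List.pyGet? byteBCC ((i : Int) + 1) with  -- byteBCC[i+1]
      | some y =>
          if y = 3 then PySem.Int.bxor (PySem.Int.bxor result byteBCC[i]) y
          else bccLoop byteBCC (i + 1) (PySem.Int.bxor result byteBCC[i])
      | none => PySem.Int.bxor result byteBCC[i]  -- Python raises IndexError here; excluded by Pre_bcc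
    else bccLoop byteBCC (i + 1) (PySem.Int.bxor result byteBCC[i])
  else result
termination_by byteBCC.length - i

def bcc (byteBCC : List Int) : Int := bccLoop byteBCC 0 0

-- ===== PORT B =====
-- index of the first adjacent (0x00, 0x03) pair, scanning zip(b, b[1:])
def bccFindTerm : List Int → Option Nat
  | x :: y :: rest =>
      if x = 0 ∧ y = 3 then some 0 else (bccFindTerm (y :: rest)).map (· + 1)
  | _ => none

def bcc_alt (byteBCC : List Int) : Int :=
  let e : Nat := match bccFindTerm byteBCC with
    | some j => j + 2
    | none => byteBCC.length
  (byteBCC.take e).foldl PySem.Int.bxor 0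

-- ===== PRECONDITION & SPEC =====
-- Pre_ excludes exactly the lists on which A raises IndexError: a trailing 0x00 with no
-- adjacent 0x00,0x03 pair anywhere (A then reads byteBCC[len] at the last iteration).
def Pre_bcc (byteBCC : List Int) : Prop :=
  ¬ (byteBCC.getLast? = some 0 ∧
     ∀ j : Nat, j < byteBCC.length - 1 → ¬ (byteBCC.getD j 0 = 0 ∧ byteBCC.getD (j + 1) 0 = 3))
instance (byteBCC : List Int) : Decidable (Pre_bcc byteBCC) := by unfold Pre_bcc; infer_instance

def pvWitness_bcc : List Int := [5, 0, 3, 9]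

def Spec_bcc (byteBCC : List Int) (out : Int) : Prop := out = bcc_alt byteBCC
instance (byteBCC : List Int) (out : Int) : Decidable (Spec_bcc byteBCC out) := by unfold Spec_bcc; infer_instance

-- ===== CLAIM (what is proved, stated in full; the proofs are below) =====
def Claim_equal_bcc : Prop := ∀ (byteBCC : List Int), Dom_bcc byteBCC → Pre_bcc byteBCC → Spec_bcc byteBCC (bcc byteBCC)

-- ===== LEMMAS AND PROOFS =====

-- structural mirror of A's loop, acting on the remaining suffix
def bccLoopL : List Int → Int → Int
  | [], r => r
  | x :: rest, r =>
      if x = 0 then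
        match rest with
        | y :: _ =>
            if y = 3 then PySem.Int.bxor (PySem.Int.bxor r x) y
            else bccLoopL rest (PySem.Int.bxor r x)
        | [] => PySem.Int.bxor r x
      else bccLoopL rest (PySem.Int.bxor r x)

theorem bccLoop_eq_loopL (b : List Int) : ∀ (i : Nat) (r : Int),
    bccLoop b i r = bccLoopL (b.drop i) r := by
  have H : ∀ (k i : Nat) (r : Int), b.length - i ≤ k →
      bccLoop b i r = bccLoopL (b.drop i) r := by
    intro k
    induction k with
    | zero =>
        intro i r h
        rw [bccLoop, dif_neg (by omega), List.drop_eq_nil_of_le (by omega)]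
        simp [bccLoopL]
    | succ k ih =>
        intro i r h
        rw [bccLoop]
        by_cases hlt : i < b.length
        · rw [dif_pos hlt]
          have hdrop : b.drop i = b[i] :: b.drop (i + 1) :=
            (List.getElem_cons_drop hlt).symm
          have hcast : ((i : Int) + 1) = ((i + 1 : Nat) : Int) := by push_cast; ring
          rw [hdrop, hcast, PySem.List.pyGet?_natCast]
          by_cases hz : b[i] = 0
          · rw [if_pos hz]
            by_cases h2 : i + 1 < b.length
            · have hsome : b[i + 1]? = some b[i + 1] := List.getElem?_eq_getElem h2
              have hdrop2 : b.drop (i + 1) = b[i + 1] :: b.drop (i + 2) :=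
                (List.getElem_cons_drop h2).symm
              rw [hsome]
              by_cases h3 : b[i + 1] = 3
              · rw [hdrop2]; simp [bccLoopL, hz, h3]
              · rw [ih (i + 1) _ (by omega), hdrop2]
                simp [bccLoopL, hz, h3]
            · have hnone : b[i + 1]? = none := by
                rw [List.getElem?_eq_none_iff]; omega
              have hnil : b.drop (i + 1) = [] := List.drop_eq_nil_of_le (by omega)
              rw [hnone, hnil]
              simp [bccLoopL, hz]
          · rw [if_neg hz, ih (i + 1) _ (by omega)]
            simp [bccLoopL, hz]
        · rw [dif_neg hlt, List.drop_eq_nil_of_le (by omega)]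
          simp [bccLoopL]
  intro i r
  exact H (b.length - i) i r le_rfl
theorem loopL_eq_alt (b : List Int) : ∀ r : Int,
    bccLoopL b r =
      (b.take (match bccFindTerm b with | some j => j + 2 | none => b.length)).foldl
        PySem.Int.bxor r := by
  induction b with
  | nil => intro r; simp [bccLoopL, bccFindTerm]
  | cons x t ih =>
      intro r
      match t with
      | [] =>
          by_cases hz : x = 0 <;> simp [bccLoopL, bccFindTerm, hz]
      | y :: rest =>
          by_cases hp : x = 0 ∧ y = 3
          · simp [bccLoopL, bccFindTerm, hp]
          · have hstep : bccLoopL (x :: y :: rest) r = bccLoopL (y :: rest) (PySem.Int.bxor r x) := by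
              by_cases hz : x = 0
              · have h3 : ¬ y = 3 := fun h => hp ⟨hz, h⟩
                simp [bccLoopL, hz, h3]
              · simp [bccLoopL, hz]
            rw [hstep, ih (PySem.Int.bxor r x)]
            rcases hft : bccFindTerm (y :: rest) with _ | j <;>
              simp [bccFindTerm, hp, hft, List.foldl_cons]
  

-- ===== VERDICT (by name: the statement is the Claim_ definition above) =====
theorem bcc_spec : Claim_equal_bcc := by
  intro b _ _
  unfold Spec_bcc bcc bcc_alt
  rw [bccLoop_eq_loopL, List.drop_zero, loopL_eq_alt]
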